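-- pv_equiv track=rewrite | github.com/MatteoBouvier/RPThermostat | rpthermostat/server/server.py | _match_one_route
-- ===== SOURCE A (Python) =====
-- def _match_one_route(
--     route: tuple[tuple[str, ...], ...], req_route: list[str]
-- ) -> tuple[bool, tuple[str, ...]]:
--     args: tuple[str, ...] = ()
--
--     if len(route) != len(req_route):
--         return False, ()
--
--     for part, req_part in zip(route, req_route):
--         if len(part) == 1 and part[0] == req_part:
--             continue
--
--         elif len(part) == 3:
--             args = args + (req_part,)
--             continue
--
--         return False, ()
--
--     return True, args
-- ===== SOURCE B (Python) =====
-- def _match_one_route(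
--     route: tuple[tuple[str, ...], ...], req_route: list[str]
-- ) -> tuple[bool, tuple[str, ...]]:
--     if len(route) != len(req_route):
--         return False, ()
--     pairs = list(zip(route, req_route))
--     ok = all(
--         len(part) == 3 or (len(part) == 1 and part[0] == req_part)
--         for part, req_part in pairs
--     )
--     if not ok:
--         return False, ()
--     return True, tuple(req_part for part, req_part in pairs if len(part) == 3)
-- ===== Notes on version B (the rewrite author's own statement) =====
-- stated objective: simpler
-- what changed: Replaces the single interleaved loop with early returns and an accumulating args tuple by a guard plus two separate passes: a validation pass (all(...)) and, if it succeeds, a collection pass building the args tuple from the 'len 3' positions.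
import Mathlib
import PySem

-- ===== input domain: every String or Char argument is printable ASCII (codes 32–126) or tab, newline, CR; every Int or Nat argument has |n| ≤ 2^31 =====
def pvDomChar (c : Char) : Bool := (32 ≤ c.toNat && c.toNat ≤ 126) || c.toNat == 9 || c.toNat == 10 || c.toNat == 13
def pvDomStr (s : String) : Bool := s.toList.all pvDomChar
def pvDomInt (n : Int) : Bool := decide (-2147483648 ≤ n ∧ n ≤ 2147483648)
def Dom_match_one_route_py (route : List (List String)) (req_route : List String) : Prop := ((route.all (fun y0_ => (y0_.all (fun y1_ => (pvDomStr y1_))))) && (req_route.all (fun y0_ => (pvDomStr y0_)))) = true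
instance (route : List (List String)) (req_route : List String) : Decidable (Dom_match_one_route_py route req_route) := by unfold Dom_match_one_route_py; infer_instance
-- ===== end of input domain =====

-- B replaces A's single accumulating loop with early returns by a length guard plus
-- two separate passes: validate all segments, then collect the wildcard arguments (simpler).

-- ===== PORT A =====
-- A's loop over zip(route, req_route) carrying the accumulated args; early return (False, ()).
-- 'part[0]' is only evaluated after 'len(part) == 1' (short-circuit), rendered by the [p0] match.
def matchOneRouteLoop : List (List String × String) → List String → Bool × List String
  | [], args => (true, args)
  | (part, reqPart) :: rest, args =>
    if (match part with | [p0] => p0 == reqPart | _ => false) then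
      matchOneRouteLoop rest args
    else if part.length == 3 then
      matchOneRouteLoop rest (args ++ [reqPart])
    else
      (false, [])

def match_one_route_py (route : List (List String)) (req_route : List String) : Bool × List String :=
  if route.length ≠ req_route.length then (false, [])
  else matchOneRouteLoop (route.zip req_route) []

-- ===== PORT B =====
-- guard, then validation pass, then collection pass over the same zipped pairs
def match_one_route_py_alt (route : List (List String)) (req_route : List String) : Bool × List String :=
  if route.length ≠ req_route.length then (false, [])
  else
    let pairs := route.zip req_route
    if pairs.all (fun pr => pr.1.length == 3 || (pr.1.length == 1 && pr.1.headD "" == pr.2)) then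
      (true, (pairs.filter (fun pr => pr.1.length == 3)).map Prod.snd)
    else (false, [])

-- ===== PRECONDITION & SPEC =====
def Spec_match_one_route_py (route : List (List String)) (req_route : List String) (out : Bool × List String) : Prop := out = match_one_route_py_alt route req_route
instance (route : List (List String)) (req_route : List String) (out : Bool × List String) : Decidable (Spec_match_one_route_py route req_route out) := by unfold Spec_match_one_route_py; infer_instance

-- ===== CLAIM (what is proved, stated in full; the proofs are below) =====
def Claim_equal_match_one_route_py : Prop := ∀ (route : List (List String)) (req_route : List String), Dom_match_one_route_py route req_route → Spec_match_one_route_py route req_route (match_one_route_py route req_route)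

-- ===== LEMMAS AND PROOFS =====

-- A's loop equals "validate everything, then append the collected wildcard values"
theorem matchOneRouteLoop_eq (l : List (List String × String)) (args : List String) :
    matchOneRouteLoop l args =
      if l.all (fun pr => pr.1.length == 3 || (pr.1.length == 1 && pr.1.headD "" == pr.2)) then
        (true, args ++ (l.filter (fun pr => pr.1.length == 3)).map Prod.snd)
      else (false, []) := by
  induction l generalizing args with
  | nil => simp [matchOneRouteLoop]
  | cons hd tl ih =>
    obtain ⟨part, reqPart⟩ := hd
    rcases part with _ | ⟨p0, _ | ⟨p1, _ | ⟨p2, _ | ⟨p3, rest⟩⟩⟩⟩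
    · simp [matchOneRouteLoop]
    · by_cases heq : p0 = reqPart
      · subst heq
        simp [matchOneRouteLoop, ih]
        congr 1
        simp
      · simp [matchOneRouteLoop, heq]
    · simp [matchOneRouteLoop]
    · simp [matchOneRouteLoop, ih]
      congr 1
    · simp [matchOneRouteLoop]

-- ===== VERDICT (by name: the statement is the Claim_ definition above) =====
theorem match_one_route_py_spec : Claim_equal_match_one_route_py := by
  intro route req_route _
  unfold Spec_match_one_route_py match_one_route_py match_one_route_py_alt
  by_cases hlen : route.length ≠ req_route.length
  · simp [hlen]
  · simp only [hlen, if_false, matchOneRouteLoop_eq, List.nil_append]
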